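-- pv_equiv track=rewrite | github.com/PreludeAndFugue/AdventOfCode | 2019/python/day10.py | make_vectors
-- ===== SOURCE A (Python) =====
-- from collections import Counter, defaultdict
-- from itertools import combinations
--
-- def make_vectors(asteroids):
--     vectors = defaultdict(list)
--     for a1, a2 in combinations(asteroids, 2):
--         x1, y1 = a1
--         x2, y2 = a2
--         vectors[a1].append((x2 - x1, -(y2 - y1)))
--         vectors[a2].append((x1 - x2, -(y1 - y2)))
--     return vectors
-- ===== SOURCE B (Python) =====
-- from collections import defaultdict
--
-- def make_vectors(asteroids):
--     vectors = defaultdict(list)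
--     if len(asteroids) < 2:
--         return vectors
--     def go(prefix, rest):
--         if not rest:
--             return
--         a = rest[0]
--         x1, y1 = a
--         vectors[a] = [(x2 - x1, -(y2 - y1)) for x2, y2 in prefix + rest[1:]]
--         go(prefix + [a], rest[1:])
--     go([], asteroids)
--     return vectors
-- ===== Notes on version B (the rewrite author's own statement) =====
-- stated objective: alternative
-- what changed: Replaces the combinations(asteroids,2) loop that grows each dict entry by two appends per unordered pair with a structural recursion over the list carrying a prefix accumulator, which builds every asteroid's complete vector row in one comprehension over prefix+rest and assigns it to the dict once.
-- outside the precondition, e.g. on make_vectors([(0, 0), (0, 0)]): A returns {(0, 0): [(0, 0), (0, 0)]}, B returns {(0, 0): [(0, 0)]}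
import Mathlib
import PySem

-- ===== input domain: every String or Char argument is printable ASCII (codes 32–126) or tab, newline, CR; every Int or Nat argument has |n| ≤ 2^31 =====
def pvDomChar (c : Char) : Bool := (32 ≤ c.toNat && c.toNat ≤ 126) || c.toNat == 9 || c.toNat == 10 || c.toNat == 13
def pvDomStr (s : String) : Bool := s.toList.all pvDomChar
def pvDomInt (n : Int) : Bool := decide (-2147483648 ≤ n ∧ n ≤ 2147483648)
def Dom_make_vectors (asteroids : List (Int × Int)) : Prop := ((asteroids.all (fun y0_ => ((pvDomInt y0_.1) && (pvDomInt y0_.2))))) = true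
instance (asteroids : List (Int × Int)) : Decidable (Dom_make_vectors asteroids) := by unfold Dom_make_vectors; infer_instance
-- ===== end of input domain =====

-- B replaces A's combinations(asteroids, 2) pass (two dict appends per unordered pair) by a
-- structural recursion with a pref accumulator that builds each asteroid's whole vector row in
-- one comprehension over pref + rest and assigns it once; same O(n^2) cost, different decomposition.

-- ===== PORT A =====
def make_vectors (asteroids : List (Int × Int)) : List (Int × Int × List (Int × Int)) :=
  (((PySem.List.combinations asteroids 2).foldl
      (fun d pair =>
        match pair with
        | [a1, a2] =>
            (d.modify a1 [] (· ++ [(a2.1 - a1.1, -(a2.2 - a1.2))])).modify a2 []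
              (· ++ [(a1.1 - a2.1, -(a1.2 - a2.2))])
        | _ => d)
      PySem.Dict.empty).items).map (fun q => (q.1.1, q.1.2, q.2))

-- ===== PORT B =====
-- the inner recursive function go(pref, rest), threading the mutated dict
def make_vectors_go (pref rest : List (Int × Int)) (d : PySem.Dict (Int × Int) (List (Int × Int))) :
    PySem.Dict (Int × Int) (List (Int × Int)) :=
  match rest with
  | [] => d
  | a :: tail =>
      make_vectors_go (pref ++ [a]) tail
        (d.insert a ((pref ++ tail).map (fun b => (b.1 - a.1, -(b.2 - a.2)))))

def make_vectors_alt (asteroids : List (Int × Int)) : List (Int × Int × List (Int × Int)) :=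
  if asteroids.length < 2 then []
  else ((make_vectors_go [] asteroids PySem.Dict.empty).items).map (fun q => (q.1.1, q.1.2, q.2))

-- ===== PRECONDITION & SPEC =====
-- Pre_ excludes lists that contain the same coordinate pair twice: there both programs merge the
-- duplicates into one defaultdict entry, and the content/order of that merged list is an accident
-- of each traversal (A appends per unordered pair, B overwrites the row), so neither is specified.
def Pre_make_vectors (asteroids : List (Int × Int)) : Prop := asteroids.Nodup
instance (asteroids : List (Int × Int)) : Decidable (Pre_make_vectors asteroids) := by
  unfold Pre_make_vectors; infer_instance
def pvWitness_make_vectors : (List (Int × Int)) := [(0, 0), (2, 1), (1, 3)]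

def Spec_make_vectors (asteroids : List (Int × Int)) (out : List (Int × Int × List (Int × Int))) : Prop := out = make_vectors_alt asteroids
instance (asteroids : List (Int × Int)) (out : List (Int × Int × List (Int × Int))) : Decidable (Spec_make_vectors asteroids out) := by unfold Spec_make_vectors; infer_instance

-- ===== CLAIM (what is proved, stated in full; the proofs are below) =====
def Claim_equal_make_vectors : Prop := ∀ (asteroids : List (Int × Int)), Dom_make_vectors asteroids → Pre_make_vectors asteroids → Spec_make_vectors asteroids (make_vectors asteroids)

-- ===== LEMMAS AND PROOFS =====

-- the vector from asteroid a to asteroid b (y axis flipped)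
def pvVec (a b : Int × Int) : Int × Int := (b.1 - a.1, -(b.2 - a.2))

-- one defaultdict append
def pvStep (d : PySem.Dict (Int × Int) (List (Int × Int))) (q : (Int × Int) × (Int × Int)) :
    PySem.Dict (Int × Int) (List (Int × Int)) := d.modify q.1 [] (· ++ [q.2])

-- A's stream of single appends, in A's order
def pvSA (xs : List (Int × Int)) : List ((Int × Int) × (Int × Int)) :=
  (PySem.List.combinations xs 2).flatMap
    (fun l => match l with
      | [a, b] => [(a, pvVec a b), (b, pvVec b a)]
      | _ => [])

-- the sub-stream of appends landing on key c, in order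
def pvSel (l : List ((Int × Int) × (Int × Int))) (c : Int × Int) : List (Int × Int) :=
  (l.filter (fun p => p.1 == c)).map (·.2)

-- B's rows in build order, as key/row pairs
def pvRowsB (pref rest : List (Int × Int)) : List ((Int × Int) × List (Int × Int)) :=
  match rest with
  | [] => []
  | a :: tail => (a, (pref ++ tail).map (pvVec a)) :: pvRowsB (pref ++ [a]) tail

theorem pvAdd_mem (s : PySem.Set (Int × Int)) (x : Int × Int) (h : x ∈ s) : PySem.Set.add s x = s := by
  simp [PySem.Set.add, PySem.Set.contains, h]

theorem pvAdd_not_mem (s : PySem.Set (Int × Int)) (x : Int × Int) (h : x ∉ s) : PySem.Set.add s x = s ++ [x] := by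
  simp [PySem.Set.add, PySem.Set.contains, h]

theorem pvFoldAdd_noop (l : List (Int × Int)) : ∀ (s : PySem.Set (Int × Int)), (∀ x ∈ l, x ∈ s) →
    l.foldl PySem.Set.add s = s := by
  induction l with
  | nil => simp
  | cons x t ih =>
    intro s hsub
    simp only [List.foldl_cons]
    rw [pvAdd_mem s x (hsub x (by simp)), ih s (fun y hy => hsub y (by simp [hy]))]

theorem pvKeys_stream (s : List ((Int × Int) × (Int × Int))) (d : PySem.Dict (Int × Int) (List (Int × Int))) :
    (s.foldl pvStep d).keys = PySem.Set.update d.keys (s.map (·.1)) :=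
  PySem.Dict.keys_foldl_modify_key (key := Prod.fst) (f := fun _d q old => old ++ [q.2]) ..

theorem pvSA_cons (x : Int × Int) (t : List (Int × Int)) :
    pvSA (x :: t) = t.flatMap (fun y => [(x, pvVec x y), (y, pvVec y x)]) ++ pvSA t := by
  unfold pvSA
  rw [show (2 : Nat) = 1 + 1 from rfl, PySem.List.combinations_cons_succ, PySem.List.combinations_one]
  simp [List.flatMap_append, List.flatMap_map]

theorem pvSA_fst_mem (xs : List (Int × Int)) : ∀ q ∈ pvSA xs, q.1 ∈ xs := by
  intro q hq
  unfold pvSA at hq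
  rw [List.mem_flatMap] at hq
  obtain ⟨l, hl, hql⟩ := hq
  have hsub : l.Sublist xs := PySem.List.sublist_of_mem_combinations hl
  match l, hql with
  | [a, b], hql =>
    have hss := hsub.subset
    simp only [List.mem_cons, List.not_mem_nil, or_false] at hql
    rcases hql with rfl | rfl
    · exact hss (by simp)
    · exact hss (by simp)

theorem pvFoldAddPair (t : List (Int × Int)) : ∀ (s : PySem.Set (Int × Int)) (x : Int × Int), x ∈ s →
    (∀ z ∈ t, z ∉ s) → t.Nodup →
    t.foldl (fun s z => PySem.Set.add (PySem.Set.add s x) z) s = s ++ t := by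
  induction t with
  | nil => simp
  | cons z t ih =>
    intro s x hx hdisj hnd
    rw [List.nodup_cons] at hnd
    simp only [List.foldl_cons]
    rw [pvAdd_mem s x hx, pvAdd_not_mem s z (hdisj z (by simp))]
    rw [ih (s ++ [z]) x (by simp [hx]) (by
      intro y hy
      simp only [List.mem_append, List.mem_singleton]
      rintro (hys | rfl)
      · exact hdisj y (by simp [hy]) hys
      · exact hnd.1 hy) hnd.2]
    simp

theorem pvKeysA (xs : List (Int × Int)) (h : xs.Nodup) :
    ((pvSA xs).foldl pvStep PySem.Dict.empty).keys = if xs.length < 2 then [] else xs := by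
  rw [pvKeys_stream]
  match xs, h with
  | [], _ => rfl
  | [x], _ => rfl
  | x :: y :: t, h =>
    simp only [List.length_cons]
    rw [if_neg (by omega)]
    rw [List.nodup_cons] at h
    obtain ⟨hxm, h⟩ := h
    rw [List.nodup_cons] at h
    obtain ⟨hym, hnd⟩ := h
    have hxy : x ≠ y := fun he => hxm (by simp [he])
    have hxt : x ∉ t := fun ht => hxm (by simp [ht])
    rw [pvSA_cons]
    show (((((y :: t).flatMap fun z => [(x, pvVec x z), (z, pvVec z x)]) ++ pvSA (y :: t)).map (·.1)).foldl PySem.Set.add []) = x :: y :: t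
    rw [List.map_append, List.foldl_append, List.map_flatMap]
    have h1 : ((y :: t).flatMap fun z => ([(x, pvVec x z), (z, pvVec z x)] : List _).map (·.1)).foldl PySem.Set.add ([] : PySem.Set (Int × Int)) = x :: y :: t := by
      simp only [List.map_cons, List.map_nil]
      rw [List.foldl_flatMap]
      simp only [List.foldl_cons, List.foldl_nil]
      rw [pvAdd_not_mem [] x (by simp)]
      rw [show ([] ++ [x] : PySem.Set (Int × Int)) = [x] from rfl]
      rw [pvAdd_not_mem [x] y (by simp [Ne.symm hxy])]
      rw [show ([x] ++ [y] : PySem.Set (Int × Int)) = [x, y] from rfl]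
      rw [pvFoldAddPair t [x, y] x (by simp) (by
        intro z hz
        simp only [List.mem_cons, List.not_mem_nil, or_false]
        rintro (rfl | rfl)
        · exact hxt hz
        · exact hym hz) hnd]
      rfl
    rw [h1]
    exact pvFoldAdd_noop _ _ (by
      intro k hk
      rw [List.mem_map] at hk
      obtain ⟨q, hq, rfl⟩ := hk
      have := pvSA_fst_mem (y :: t) q hq
      simp [List.mem_cons] at this ⊢
      tauto)

theorem pvSel_append (l l' : List ((Int × Int) × (Int × Int))) (c : Int × Int) :
    pvSel (l ++ l') c = pvSel l c ++ pvSel l' c := by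
  simp [pvSel]

theorem pvFrontSel (t : List (Int × Int)) (x c : Int × Int) :
    x ∉ t → t.Nodup →
    pvSel (t.flatMap (fun y => [(x, pvVec x y), (y, pvVec y x)])) c =
      if x = c then t.map (pvVec c) else if c ∈ t then [pvVec c x] else [] := by
  induction t with
  | nil => intro _ _; simp [pvSel]
  | cons y t ih =>
    intro hx hnd
    rw [List.nodup_cons] at hnd
    have hxy : x ≠ y := fun he => hx (by simp [he])
    have hxt : x ∉ t := fun ht => hx (by simp [ht])
    rw [List.flatMap_cons, pvSel_append, ih hxt hnd.2]
    have hblock : pvSel [(x, pvVec x y), (y, pvVec y x)] c =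
        (if x = c then [pvVec x y] else []) ++ (if y = c then [pvVec y x] else []) := by
      by_cases h1 : x = c <;> by_cases h2 : y = c <;> simp [pvSel, h1, h2]
    rw [hblock]
    by_cases h1 : x = c
    · subst h1
      simp [Ne.symm hxy]
    · by_cases h2 : y = c
      · subst h2
        simp [h1, hnd.1]
      · have hcy : ¬(c = y) := fun h => h2 h.symm
        simp [h1, h2, hcy]

theorem pvSelA (xs : List (Int × Int)) (c : Int × Int) (h : xs.Nodup) :
    pvSel (pvSA xs) c = if c ∈ xs then (xs.filter (fun b => ¬(b = c))).map (pvVec c) else [] := by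
  induction xs with
  | nil => simp [pvSA, pvSel, PySem.List.combinations_nil_succ (r := 1)]
  | cons x t ih =>
    rw [List.nodup_cons] at h
    rw [pvSA_cons, pvSel_append, pvFrontSel t x c h.1 h.2, ih h.2]
    by_cases h1 : x = c
    · have hct : c ∉ t := h1 ▸ h.1
      have hft : (c :: t).filter (fun b => !decide (b = c)) = t := by
        rw [List.filter_cons_of_neg (by simp)]
        exact List.filter_eq_self.mpr (fun b hb => by
          simp only [Bool.not_eq_eq_eq_not, Bool.not_true, decide_eq_false_iff_not]
          exact fun he => hct (he ▸ hb))
      simp [h1, hct, hft]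
    · by_cases h2 : c ∈ t
      · have hfx : (x :: t).filter (fun b => !decide (b = c)) = x :: t.filter (fun b => !decide (b = c)) :=
          List.filter_cons_of_pos (by simp [h1])
        simp [h1, h2, hfx]
      · have hcx : ¬ c = x := fun he => h1 he.symm
        simp [h1, h2, hcx]

theorem make_vectors_eq_foldA (xs : List (Int × Int)) :
    make_vectors xs = (((pvSA xs).foldl pvStep PySem.Dict.empty).items).map (fun q => (q.1.1, q.1.2, q.2)) := by
  unfold make_vectors pvSA
  rw [List.foldl_flatMap]
  congr 3
  funext d l
  match l with
  | [] => rfl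
  | [a] => rfl
  | [a, b] => rfl
  | a :: b :: c :: t => rfl

theorem pvNodupKeys (s : List ((Int × Int) × (Int × Int))) :
    ((s.foldl pvStep PySem.Dict.empty).keys).Nodup :=
  PySem.Dict.nodup_keys_foldl_modify_key s Prod.fst [] (fun d q old => old ++ [q.2])
    PySem.Dict.empty (by simp)

theorem pvGetD_stream (s : List ((Int × Int) × (Int × Int))) (c : Int × Int) :
    (s.foldl pvStep PySem.Dict.empty).getD c [] = pvSel s c := by
  show (s.foldl (fun d p => d.modify p.1 [] (· ++ [p.2])) PySem.Dict.empty).getD c [] = pvSel s c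
  rw [PySem.Dict.getD_foldl_modify_append]
  simp [pvSel]

-- B's recursion over fresh distinct keys appends its rows to the dict's items
theorem pvGoItems : ∀ (rest pref : List (Int × Int)) (d : PySem.Dict (Int × Int) (List (Int × Int))),
    (∀ a ∈ rest, d.contains a = false) → rest.Nodup →
    (make_vectors_go pref rest d).items = d.items ++ pvRowsB pref rest := by
  intro rest
  induction rest with
  | nil => intro pref d _ _; simp [make_vectors_go, pvRowsB]
  | cons a tail ih =>
    intro pref d hfresh hnd
    rw [List.nodup_cons] at hnd
    show (make_vectors_go (pref ++ [a]) tail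
        (d.insert a ((pref ++ tail).map (fun b => (b.1 - a.1, -(b.2 - a.2)))))).items = _
    rw [ih (pref ++ [a]) _ (by
      intro b hb
      rw [PySem.Dict.contains_insert]
      have hba : b ≠ a := fun he => hnd.1 (he ▸ hb)
      simp [hba, hfresh b (by simp [hb])]) hnd.2]
    rw [PySem.Dict.items_insert_of_not_contains _ _ (hfresh a (by simp))]
    rw [List.append_assoc]
    rfl

-- each row is the filter-over-the-whole-list row, when the whole list has no duplicates
theorem pvRowsB_eq : ∀ (rest pref : List (Int × Int)), (pref ++ rest).Nodup →
    pvRowsB pref rest =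
      rest.map (fun a => (a, ((pref ++ rest).filter (fun b => ¬(b = a))).map (pvVec a))) := by
  intro rest
  induction rest with
  | nil => simp [pvRowsB]
  | cons a tail ih =>
    intro pref hnd
    have hnd' : ((pref ++ [a]) ++ tail).Nodup := by
      rw [List.append_assoc]; simpa using hnd
    obtain ⟨hpre, hat, hdisj⟩ := List.nodup_append.mp hnd
    rw [List.nodup_cons] at hat
    have hapre : a ∉ pref := fun hp => hdisj a hp a (by simp) rfl
    have hfa : (pref ++ a :: tail).filter (fun b => !decide (b = a)) = pref ++ tail := by
      rw [List.filter_append, List.filter_cons_of_neg (by simp)]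
      congr 1
      · exact List.filter_eq_self.mpr (fun b hb => by
          simp only [Bool.not_eq_eq_eq_not, Bool.not_true, decide_eq_false_iff_not]
          exact fun he => hapre (he ▸ hb))
      · exact List.filter_eq_self.mpr (fun b hb => by
          simp only [Bool.not_eq_eq_eq_not, Bool.not_true, decide_eq_false_iff_not]
          exact fun he => hat.1 (he ▸ hb))
    rw [pvRowsB, ih (pref ++ [a]) hnd', List.map_cons]
    simp only [List.append_assoc, List.singleton_append]
    congr 1
    simp only [decide_not]
    rw [hfa]

-- ===== VERDICT (by name: the statement is the Claim_ definition above) =====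
theorem make_vectors_spec : Claim_equal_make_vectors := by
  intro xs _ hpre
  show make_vectors xs = make_vectors_alt xs
  rw [make_vectors_eq_foldA,
      PySem.Dict.items_eq_map_keys _ (pvNodupKeys (pvSA xs)) [],
      pvKeysA xs hpre]
  unfold make_vectors_alt
  by_cases h2 : xs.length < 2
  · simp [h2]
  · rw [if_neg h2, if_neg h2]
    rw [pvGoItems xs [] PySem.Dict.empty (by simp [PySem.Dict.contains_empty]) hpre]
    rw [pvRowsB_eq xs [] (by simpa using hpre)]
    rw [show (PySem.Dict.empty : PySem.Dict (Int × Int) (List (Int × Int))).items = [] from rfl]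
    simp only [List.nil_append]
    rw [List.map_map, List.map_map]
    apply List.map_congr_left
    intro c hc
    simp only [Function.comp_apply]
    rw [pvGetD_stream, pvSelA xs c hpre, if_pos hc]
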